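-- pv_equiv track=rewrite | github.com/mateusztront/zwrotnica | PycharmProjects/pythonProject3/Egzamin 1 vol. 2.py | name_sorter
-- ===== SOURCE A (Python) =====
-- def name_sorter(name_list):
--     male_list = []
--     female_list = []
--     for name in name_list:
--         if name[-1] == 'a':
--             female_list.append(name)
--         else:
--             male_list.append(name)
--     male_list.sort()
--     female_list.sort()
--     out = {}
--     out['male'] = male_list
--     out['female'] = female_list
--     return out
-- ===== SOURCE B (Python) =====
-- def name_sorter(name_list):
--     # Divide and conquer: split the list in half, recursively obtain the
--     # sorted (male, female) pair of each half, then merge the halves.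
--     def merge(xs, ys):
--         out = []
--         i = j = 0
--         while i < len(xs) and j < len(ys):
--             if ys[j] < xs[i]:
--                 out.append(ys[j])
--                 j += 1
--             else:
--                 out.append(xs[i])
--                 i += 1
--         out.extend(xs[i:])
--         out.extend(ys[j:])
--         return out
--
--     def solve(lst):
--         if len(lst) <= 1:
--             if lst and lst[0][-1] == 'a':
--                 return [], lst
--             return lst, []
--         mid = len(lst) // 2
--         m1, f1 = solve(lst[:mid])
--         m2, f2 = solve(lst[mid:])
--         return merge(m1, m2), merge(f1, f2)
--
--     male, female = solve(name_list)
--     return {'male': male, 'female': female}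
-- ===== Notes on version B (the rewrite author's own statement) =====
-- stated objective: alternative
-- what changed: B replaces A's partition-then-two-library-sorts with a recursive divide-and-conquer: it splits the list in half, recursively computes the sorted (male, female) pair of each half, and merges the two pairs (a merge sort fused with the partition).
import Mathlib
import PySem

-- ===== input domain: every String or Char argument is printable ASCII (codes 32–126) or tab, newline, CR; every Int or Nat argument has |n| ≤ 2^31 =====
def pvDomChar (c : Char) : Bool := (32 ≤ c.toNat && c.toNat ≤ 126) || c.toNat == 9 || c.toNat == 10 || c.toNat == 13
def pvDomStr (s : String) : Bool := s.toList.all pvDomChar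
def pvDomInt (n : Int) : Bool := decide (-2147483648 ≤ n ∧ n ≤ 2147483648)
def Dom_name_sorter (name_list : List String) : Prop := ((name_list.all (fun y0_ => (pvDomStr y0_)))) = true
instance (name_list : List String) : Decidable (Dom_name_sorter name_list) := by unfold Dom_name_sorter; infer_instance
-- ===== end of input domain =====

-- B replaces A's partition-then-two-library-sorts by a divide-and-conquer that splits the
-- list in half, recurses, and merges the two sorted (male, female) pairs; alternative
-- algorithm, same asymptotic cost.

-- `name[-1] == 'a'` (none = IndexError on the empty string, excluded by Pre_)
def pvIsFem (name : String) : Bool := PySem.Str.pyGet? name (-1) == some 'a'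

-- ===== PORT A =====
def name_sorter (name_list : List String) : List (String × List String) :=
  let p := name_list.foldl
    (fun acc name =>
      if pvIsFem name then (acc.1, acc.2 ++ [name]) else (acc.1 ++ [name], acc.2))
    ([], [])
  let male := PySem.List.sorted p.1 (fun x => x) false
  let female := PySem.List.sorted p.2 (fun x => x) false
  ((PySem.Dict.empty.insert "male" male).insert "female" female).items

-- ===== PORT B =====
-- Source B's `merge`: the two-cursor while loop plus the two tail extends
def pvMerge : List String → List String → List String
  | [], ys => ys
  | x :: xs, [] => x :: xs
  | x :: xs, y :: ys =>
      if y < x then y :: pvMerge (x :: xs) ys else x :: pvMerge xs (y :: ys)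
termination_by xs ys => xs.length + ys.length

-- Source B's `solve`: base case len(lst) <= 1, else split at len//2, recurse, merge the pairs
def pvSolve (lst : List String) : List String × List String :=
  match lst with
  | [] => ([], [])
  | [x] => if pvIsFem x then ([], [x]) else ([x], [])
  | a :: b :: rest =>
      (pvMerge (pvSolve ((a :: b :: rest).take ((a :: b :: rest).length / 2))).1
               (pvSolve ((a :: b :: rest).drop ((a :: b :: rest).length / 2))).1,
       pvMerge (pvSolve ((a :: b :: rest).take ((a :: b :: rest).length / 2))).2
               (pvSolve ((a :: b :: rest).drop ((a :: b :: rest).length / 2))).2)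
termination_by lst.length
decreasing_by all_goals (simp; omega)

def name_sorter_alt (name_list : List String) : List (String × List String) :=
  let p := pvSolve name_list
  ((PySem.Dict.empty.insert "male" p.1).insert "female" p.2).items

-- ===== PRECONDITION & SPEC =====
-- Pre_ excludes lists containing the empty string, on which A's `name[-1]` raises IndexError.
def Pre_name_sorter (name_list : List String) : Prop := "" ∉ name_list
instance (name_list : List String) : Decidable (Pre_name_sorter name_list) := by unfold Pre_name_sorter; infer_instance
def pvWitness_name_sorter : List String := ["Anna", "Bob", "ada", "Zoe"]

def Spec_name_sorter (name_list : List String) (out : List (String × List String)) : Prop := out = name_sorter_alt name_list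
instance (name_list : List String) (out : List (String × List String)) : Decidable (Spec_name_sorter name_list out) := by unfold Spec_name_sorter; infer_instance

-- ===== CLAIM (what is proved, stated in full; the proofs are below) =====
def Claim_equal_name_sorter : Prop := ∀ (name_list : List String), Dom_name_sorter name_list → Pre_name_sorter name_list → Spec_name_sorter name_list (name_sorter name_list)

-- ===== LEMMAS AND PROOFS =====

-- the pair-accumulating partition loop is a pair of filters
theorem pv_partition_foldl (xs : List String) (m f : List String) :
    xs.foldl
      (fun acc name =>
        if pvIsFem name then (acc.1, acc.2 ++ [name]) else (acc.1 ++ [name], acc.2))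
      (m, f)
    = (m ++ xs.filter (fun n => !pvIsFem n), f ++ xs.filter pvIsFem) := by
  induction xs generalizing m f with
  | nil => simp
  | cons x xs ih =>
    by_cases hx : pvIsFem x <;> simp [List.foldl_cons, hx, ih]

-- merge is a permutation of the concatenation
theorem pv_merge_perm (xs ys : List String) : (pvMerge xs ys).Perm (xs ++ ys) := by
  fun_induction pvMerge with
  | case1 ys => simp
  | case2 x xs => simp
  | case3 x xs y ys h ih => exact (ih.cons y).trans List.perm_middle.symm
  | case4 x xs y ys h ih => exact ih.cons x

-- merge of two ≤-sorted lists is ≤-sorted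
theorem pv_merge_pairwise (xs ys : List String)
    (hx : xs.Pairwise (· ≤ ·)) (hy : ys.Pairwise (· ≤ ·)) :
    (pvMerge xs ys).Pairwise (· ≤ ·) := by
  fun_induction pvMerge with
  | case1 ys => exact hy
  | case2 x xs => exact hx
  | case3 x xs y ys h ih =>
      refine List.pairwise_cons.2 ⟨?_, ih hx (List.pairwise_cons.1 hy).2⟩
      intro z hz
      have hz' := (pv_merge_perm (x :: xs) ys).mem_iff.1 hz
      rcases List.mem_append.1 hz' with hz1 | hz2
      · rcases List.mem_cons.1 hz1 with rfl | hz1'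
        · exact le_of_lt h
        · exact le_trans (le_of_lt h) ((List.pairwise_cons.1 hx).1 z hz1')
      · exact (List.pairwise_cons.1 hy).1 z hz2
  | case4 x xs y ys h ih =>
      refine List.pairwise_cons.2 ⟨?_, ih (List.pairwise_cons.1 hx).2 hy⟩
      intro z hz
      have hz' := (pv_merge_perm xs (y :: ys)).mem_iff.1 hz
      rcases List.mem_append.1 hz' with hz1 | hz2
      · exact (List.pairwise_cons.1 hx).1 z hz1
      · rcases List.mem_cons.1 hz2 with rfl | hz2'
        · exact not_lt.1 h
        · exact le_trans (not_lt.1 h) ((List.pairwise_cons.1 hy).1 z hz2')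

-- the divide-and-conquer produces sorted permutations of the two filters
theorem pv_solve_spec (lst : List String) :
    (pvSolve lst).1.Perm (lst.filter (fun n => !pvIsFem n)) ∧
    (pvSolve lst).1.Pairwise (· ≤ ·) ∧
    (pvSolve lst).2.Perm (lst.filter pvIsFem) ∧
    (pvSolve lst).2.Pairwise (· ≤ ·) := by
  fun_induction pvSolve with
  | case1 => simp
  | case2 x hx => simp [hx]
  | case3 x hx => simp at hx; simp [hx]
  | case4 a b rest iht ihd =>
      obtain ⟨hm1, hs1, hf1, ht1⟩ := iht
      obtain ⟨hm2, hs2, hf2, ht2⟩ := ihd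
      have hsplit := List.take_append_drop ((a :: b :: rest).length / 2) (a :: b :: rest)
      refine ⟨?_, pv_merge_pairwise _ _ hs1 hs2, ?_, pv_merge_pairwise _ _ ht1 ht2⟩
      · exact (pv_merge_perm _ _).trans ((hm1.append hm2).trans
          (by rw [← List.filter_append, hsplit]))
      · exact (pv_merge_perm _ _).trans ((hf1.append hf2).trans
          (by rw [← List.filter_append, hsplit]))

theorem pv_solve_eq_sorted (lst : List String) :
    pvSolve lst = (PySem.List.sorted (lst.filter (fun n => !pvIsFem n)) (fun x => x) false,
                   PySem.List.sorted (lst.filter pvIsFem) (fun x => x) false) := by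
  obtain ⟨hm, hs, hf, ht⟩ := pv_solve_spec lst
  exact Prod.ext (PySem.List.sorted_id_eq_of_perm_of_pairwise _ _ hm hs).symm
    (PySem.List.sorted_id_eq_of_perm_of_pairwise _ _ hf ht).symm

-- ===== VERDICT (by name: the statement is the Claim_ definition above) =====
theorem name_sorter_spec : Claim_equal_name_sorter := by
  intro name_list _ _
  unfold Spec_name_sorter name_sorter name_sorter_alt
  simp only [pv_partition_foldl, List.nil_append, pv_solve_eq_sorted]
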